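-- pv_equiv track=rewrite | github.com/nvaikunthan/Final_Thesis | Thesis_PreProcessing/more_io.py | map_merge
-- ===== SOURCE A (Python) =====
-- def map_merge(map1, map2):
--     merged_map = {}
--     idx = 0
--     for key in map1:
--         if key not in merged_map:
--             merged_map[key] = idx
--             idx += 1
--
--     for key in map2:
--         if key not in merged_map:
--             merged_map[key] = idx
--             idx += 1
--
--     return merged_map
-- ===== SOURCE B (Python) =====
-- def map_merge(map1, map2):
--     seq = list(map1) + list(map2)
--     return {k: len(set(seq[:i])) for i, k in enumerate(seq) if k not in seq[:i]}
-- ===== Notes on version B (the rewrite author's own statement) =====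
-- stated objective: alternative
-- what changed: B keeps no running counter and no growing dict/seen structure: for each position in the concatenated key stream it decides first-occurrence by membership in the raw prefix seq[:i] and computes the index independently as len(set(seq[:i])), the distinct count of that prefix -- a stateless per-key closed form (quadratic) instead of A's single stateful pass.
import Mathlib
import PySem

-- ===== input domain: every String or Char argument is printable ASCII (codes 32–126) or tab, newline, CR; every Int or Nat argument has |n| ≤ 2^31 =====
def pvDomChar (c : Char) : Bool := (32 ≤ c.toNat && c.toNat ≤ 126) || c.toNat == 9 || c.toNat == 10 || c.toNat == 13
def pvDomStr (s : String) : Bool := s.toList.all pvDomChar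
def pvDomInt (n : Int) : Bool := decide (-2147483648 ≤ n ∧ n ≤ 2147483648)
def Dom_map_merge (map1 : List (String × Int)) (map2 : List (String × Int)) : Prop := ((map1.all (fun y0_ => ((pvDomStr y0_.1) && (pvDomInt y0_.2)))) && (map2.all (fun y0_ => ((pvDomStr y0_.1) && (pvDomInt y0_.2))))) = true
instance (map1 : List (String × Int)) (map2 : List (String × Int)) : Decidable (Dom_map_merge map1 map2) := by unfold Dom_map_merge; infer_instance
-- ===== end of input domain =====

-- B is a stateless per-key closed form: a key is kept iff it is absent from the raw prefix seq[:i],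
-- and its index is len(set(seq[:i])), instead of A's single pass with a dict and a running counter.


-- ===== PORT A =====
-- one iteration of A's loop body: 'if key not in merged_map: merged_map[key] = idx; idx += 1'
def mapMergeStep (st : PySem.Dict String Int × Int) (key : String) : PySem.Dict String Int × Int :=
  if st.1.contains key then st else (st.1.insert key st.2, st.2 + 1)

def map_merge (map1 : List (String × Int)) (map2 : List (String × Int)) : List (String × Int) :=
  -- merged_map = {}; idx = 0; two 'for key in …' loops over the dicts' keys
  let st1 := (map1.map Prod.fst).foldl mapMergeStep (PySem.Dict.empty, 0)
  let st2 := (map2.map Prod.fst).foldl mapMergeStep st1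
  st2.1.items

-- ===== PORT B =====
-- seq = list(map1) + list(map2);  {k: len(set(seq[:i])) for i, k in enumerate(seq) if k not in seq[:i]}
-- (the generated keys are first occurrences, hence pairwise distinct, so the comprehension's
--  dict items are exactly the generated pairs in order)
def map_merge_alt (map1 : List (String × Int)) (map2 : List (String × Int)) : List (String × Int) :=
  let seq := map1.map Prod.fst ++ map2.map Prod.fst
  ((PySem.List.enumerate seq).filter
      (fun p => !(PySem.List.slice seq none (some p.1)).contains p.2)).map
    (fun p => (p.2, ((PySem.Set.ofList (PySem.List.slice seq none (some p.1))).length : Int)))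

-- ===== PRECONDITION & SPEC =====
def Spec_map_merge (map1 : List (String × Int)) (map2 : List (String × Int)) (out : List (String × Int)) : Prop := out = map_merge_alt map1 map2
instance (map1 : List (String × Int)) (map2 : List (String × Int)) (out : List (String × Int)) : Decidable (Spec_map_merge map1 map2 out) := by unfold Spec_map_merge; infer_instance

-- ===== CLAIM (what is proved, stated in full; the proofs are below) =====
def Claim_equal_map_merge : Prop := ∀ (map1 : List (String × Int)) (map2 : List (String × Int)), Dom_map_merge map1 map2 → Spec_map_merge map1 map2 (map_merge map1 map2)

-- ===== LEMMAS AND PROOFS =====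

-- the keys of ks not already in `seen`, first occurrences in order
def sift : List String → List String → List String
  | [], _ => []
  | k :: ks, seen => if seen.contains k then sift ks seen else k :: sift ks (seen ++ [k])

theorem sift_congr (ks : List String) (s s' : List String)
    (h : ∀ x, s.contains x = s'.contains x) : sift ks s = sift ks s' := by
  induction ks generalizing s s' with
  | nil => rfl
  | cons k ks ih =>
    simp only [sift, h k]
    by_cases hk : s'.contains k = true
    · simp only [hk, if_true]; exact ih s s' h
    · simp only [hk, if_false, Bool.false_eq_true]
      congr 1
      refine ih (s ++ [k]) (s' ++ [k]) ?_
      intro x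
      by_cases hxk : x = k
      · simp [hxk]
      · have hm : (x ∈ s) ↔ (x ∈ s') := by
          rw [← List.contains_iff_mem, ← List.contains_iff_mem, h x]
        simp [hm]

theorem contains_append_single (s : List String) (k x : String) (h : s.contains k = true) :
    (s ++ [k]).contains x = s.contains x := by
  by_cases hxk : x = k
  · subst hxk
    have : x ∈ s := List.contains_iff_mem.mp h
    simp [this]
  · simp [hxk]

theorem dict_contains_eq (d : List (String × Int)) (k : String) :
    (PySem.Dict.mk d).contains k = (d.map Prod.fst).contains k := by
  induction d with
  | nil => rfl
  | cons p d ih =>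
    simp only [PySem.Dict.contains, List.any_cons, List.map_cons, List.contains_cons] at *
    rw [← ih, BEq.comm, Bool.or_comm]

theorem loop_inv (ks : List String) (d : List (String × Int)) (n : Int) :
    ks.foldl mapMergeStep (PySem.Dict.mk d, n) =
      (PySem.Dict.mk (d ++ (PySem.List.enumerate (sift ks (d.map Prod.fst)) n).map (fun p => (p.2, p.1))),
       n + (sift ks (d.map Prod.fst)).length) := by
  induction ks generalizing d n with
  | nil => simp [sift]
  | cons k ks ih =>
    simp only [List.foldl_cons, mapMergeStep, sift, dict_contains_eq]
    by_cases h : (d.map Prod.fst).contains k = true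
    · simp only [h, if_true]
      exact ih d n
    · simp only [h, if_false, Bool.false_eq_true, PySem.Dict.insert, dict_contains_eq]
      have := ih (d ++ [(k, n)]) (n + 1)
      simp only [List.map_append, List.map_cons, List.map_nil] at this
      rw [this]
      simp [PySem.List.enumerate_cons, List.append_assoc]
      omega

theorem ofList_append_single (s : List String) (k : String) :
    PySem.Set.ofList (s ++ [k]) = PySem.Set.add (PySem.Set.ofList s) k := by
  simp [PySem.Set.ofList]

-- B's comprehension body over the tail `ks` of seq = pre ++ ks equals the enumerate-of-sift form.
theorem alt_inv (ks pre : List String) :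
    ((PySem.List.enumerate ks (pre.length : Int)).filter
        (fun p => !(PySem.List.slice (pre ++ ks) none (some p.1)).contains p.2)).map
      (fun p => (p.2, ((PySem.Set.ofList (PySem.List.slice (pre ++ ks) none (some p.1))).length : Int)))
    = (PySem.List.enumerate (sift ks pre) ((PySem.Set.ofList pre).length : Int)).map
        (fun p => (p.2, p.1)) := by
  induction ks generalizing pre with
  | nil => simp [sift]
  | cons k ks ih =>
    have hslice : PySem.List.slice (pre ++ k :: ks) none (some (pre.length : Int)) = pre := by
      rw [PySem.List.slice_to_natCast]
      exact List.take_left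
    have hassoc : pre ++ k :: ks = (pre ++ [k]) ++ ks := by simp
    have hlen1 : ((pre ++ [k]).length : Int) = (pre.length : Int) + 1 := by
      simp [List.length_append]
    by_cases h : pre.contains k = true
    · -- duplicate: dropped by the filter, sift skips it
      simp only [PySem.List.enumerate_cons, List.filter_cons, hslice, h, Bool.not_true,
        Bool.false_eq_true, if_false, sift, if_true]
      rw [hassoc, ← hlen1, ih (pre ++ [k])]
      have hsift : sift ks (pre ++ [k]) = sift ks pre :=
        sift_congr ks (pre ++ [k]) pre (fun x => contains_append_single pre k x h)
      have hset : PySem.Set.ofList (pre ++ [k]) = PySem.Set.ofList pre := by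
        rw [ofList_append_single, PySem.Set.add]
        have hm : k ∈ pre := List.contains_iff_mem.mp h
        simp [hm]
      rw [hsift, hset]
    · -- first occurrence: kept with index len(set(pre))
      simp only [PySem.List.enumerate_cons, List.filter_cons, hslice, h, Bool.not_false,
        if_true, sift, Bool.false_eq_true, if_false, List.map_cons]
      rw [hassoc, ← hlen1, ih (pre ++ [k])]
      have hset : PySem.Set.ofList (pre ++ [k]) = PySem.Set.ofList pre ++ [k] := by
        rw [ofList_append_single, PySem.Set.add]
        have hm : k ∉ pre := fun hm => h (List.contains_iff_mem.mpr hm)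
        simp [hm]
      rw [hset]
      simp [List.length_append]

-- ===== VERDICT (by name: the statement is the Claim_ definition above) =====
theorem map_merge_spec : Claim_equal_map_merge := by
  intro map1 map2 _
  show map_merge map1 map2 = map_merge_alt map1 map2
  simp only [map_merge, map_merge_alt]
  rw [← List.foldl_append]
  have h := loop_inv (map1.map Prod.fst ++ map2.map Prod.fst) [] 0
  simp only [List.map_nil] at h
  rw [show (PySem.Dict.empty : PySem.Dict String Int) = PySem.Dict.mk [] from rfl, h]
  have hb := alt_inv (map1.map Prod.fst ++ map2.map Prod.fst) []
  have h0 : ((PySem.Set.ofList ([] : List String)).length : Int) = 0 := rfl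
  simp only [List.nil_append, List.length_nil, Nat.cast_zero, h0] at hb
  simp only [List.nil_append]
  exact hb.symm
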